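-- pv_equiv track=rewrite | github.com/davidebolo1993/cosigt | cosigt_smk/workflow/extra/cluster.py | GroupBundles
-- ===== SOURCE A (Python) =====
-- def GroupBundles(ids_old, idx_new):
--
-- 	'''
-- 	Re-group bundles
-- 	'''
--
-- 	m=dict()
--
-- 	for i,idx in enumerate(idx_new):
--
-- 		if idx in m:
--
-- 			m[idx].append(ids_old[i])
--
-- 		else:
--
-- 			m[idx] = [ids_old[i]]
--
-- 	return m
-- ===== SOURCE B (Python) =====
-- def GroupBundles(ids_old, idx_new):
--     '''
--     Re-group bundles: for each distinct new index (in first-appearance order),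
--     collect the old ids mapped to it by one scan of idx_new per key.
--     '''
--     return {k: [ids_old[i] for i, x in enumerate(idx_new) if x == k]
--             for k in dict.fromkeys(idx_new)}
-- ===== Notes on version B (the rewrite author's own statement) =====
-- stated objective: simpler
-- what changed: Replaces A's single-pass dict-building loop (membership test, append-or-insert) with a dict comprehension over the distinct keys, rebuilding each bucket by re-scanning idx_new per key.
import Mathlib
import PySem

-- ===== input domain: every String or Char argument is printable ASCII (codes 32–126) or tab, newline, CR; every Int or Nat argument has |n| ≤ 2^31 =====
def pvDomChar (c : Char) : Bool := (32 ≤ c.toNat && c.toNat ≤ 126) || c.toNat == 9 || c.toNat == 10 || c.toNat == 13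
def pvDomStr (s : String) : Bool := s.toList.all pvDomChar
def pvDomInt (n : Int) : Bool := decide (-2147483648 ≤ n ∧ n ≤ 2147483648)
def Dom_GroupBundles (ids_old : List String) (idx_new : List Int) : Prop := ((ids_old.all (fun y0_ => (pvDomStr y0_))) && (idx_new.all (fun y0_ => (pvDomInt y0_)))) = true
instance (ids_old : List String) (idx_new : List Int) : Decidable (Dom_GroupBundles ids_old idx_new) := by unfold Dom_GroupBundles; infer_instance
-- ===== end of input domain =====

-- B replaces A's single-pass dict-building loop by a dict comprehension over the
-- distinct keys with a per-key re-scan of idx_new (objective: simpler).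


-- ===== PORT A =====
-- literal port of A: for i,idx in enumerate(idx_new): if idx in m: m[idx].append(ids_old[i]) else m[idx]=[ids_old[i]]
-- (ids_old[i] is pyGetD; i ≥ 0 here and Pre_ guarantees it is in range, where pyGetD is exact)
def GroupBundles (ids_old : List String) (idx_new : List Int) : List (Int × List String) :=
  ((PySem.List.enumerate idx_new).foldl
    (fun (m : PySem.Dict Int (List String)) p =>
      if m.contains p.2 then
        m.modify p.2 [] (fun l => l ++ [PySem.List.pyGetD ids_old p.1 ""])
      else
        m.insert p.2 [PySem.List.pyGetD ids_old p.1 ""])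
    PySem.Dict.empty).items

-- ===== PORT B =====
-- {k: [ids_old[i] for i, x in enumerate(idx_new) if x == k] for k in dict.fromkeys(idx_new)}
def GroupBundles_alt (ids_old : List String) (idx_new : List Int) : List (Int × List String) :=
  (PySem.List.dedup idx_new).map (fun k =>
    (k, ((PySem.List.enumerate idx_new).filter (fun p => p.2 == k)).map
          (fun p => PySem.List.pyGetD ids_old p.1 "")))

-- ===== PRECONDITION & SPEC =====
-- Pre_ excludes inputs where idx_new is longer than ids_old: there ids_old[i] raises IndexError (in both A and B).
def Pre_GroupBundles (ids_old : List String) (idx_new : List Int) : Prop :=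
  idx_new.length ≤ ids_old.length
instance (ids_old : List String) (idx_new : List Int) : Decidable (Pre_GroupBundles ids_old idx_new) := by unfold Pre_GroupBundles; infer_instance

def pvWitness_GroupBundles : List String × List Int := (["a", "b", "c"], [1, 0, 1])

def Spec_GroupBundles (ids_old : List String) (idx_new : List Int) (out : List (Int × List String)) : Prop := out = GroupBundles_alt ids_old idx_new
instance (ids_old : List String) (idx_new : List Int) (out : List (Int × List String)) : Decidable (Spec_GroupBundles ids_old idx_new out) := by unfold Spec_GroupBundles; infer_instance

-- ===== CLAIM (what is proved, stated in full; the proofs are below) =====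
def Claim_equal_GroupBundles : Prop := ∀ (ids_old : List String) (idx_new : List Int), Dom_GroupBundles ids_old idx_new → Pre_GroupBundles ids_old idx_new → Spec_GroupBundles ids_old idx_new (GroupBundles ids_old idx_new)

-- ===== LEMMAS AND PROOFS =====

-- A's if/else step is exactly Dict.modify with default []
theorem step_eq_modify (m : PySem.Dict Int (List String)) (k : Int) (v : String) :
    (if m.contains k then m.modify k [] (fun l => l ++ [v]) else m.insert k [v])
      = m.modify k [] (fun l => l ++ [v]) := by
  by_cases h : m.contains k = true
  · simp [h]
  · have h' : m.contains k = false := by simpa using h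
    simp [h', PySem.Dict.modify, PySem.Dict.getD_of_not_contains]

theorem GroupBundles_eq_modify_fold (ids_old : List String) (idx_new : List Int) :
    GroupBundles ids_old idx_new =
      (((PySem.List.enumerate idx_new).map
          (fun p => (p.2, PySem.List.pyGetD ids_old p.1 ""))).foldl
        (fun (d : PySem.Dict Int (List String)) q => d.modify q.1 [] (fun l => l ++ [q.2]))
        PySem.Dict.empty).items := by
  unfold GroupBundles
  rw [List.foldl_map]
  congr 1
  apply PySem.List.foldl_congr_mem
  intro acc p _
  exact step_eq_modify acc p.2 _

theorem GroupBundles_spec' (ids_old : List String) (idx_new : List Int) :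
    GroupBundles ids_old idx_new = GroupBundles_alt ids_old idx_new := by
  rw [GroupBundles_eq_modify_fold]
  set l := (PySem.List.enumerate idx_new).map
      (fun p => (p.2, PySem.List.pyGetD ids_old p.1 "")) with hl
  set d := l.foldl
      (fun (d : PySem.Dict Int (List String)) q => d.modify q.1 [] (fun s => s ++ [q.2]))
      PySem.Dict.empty with hd
  have hnd : d.keys.Nodup := by
    rw [hd]
    exact PySem.Dict.nodup_keys_foldl_modify_key l (fun q => q.1) [] (fun d q l => l ++ [q.2])
      PySem.Dict.empty (by simp)
  have h2 : l.map (fun q => q.1) = idx_new := by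
    rw [hl, List.map_map]
    simp [Function.comp_def, PySem.List.map_snd_enumerate]
  have hkeys : d.keys = PySem.List.dedup idx_new := by
    rw [hd, PySem.Dict.keys_foldl_modify_key]
    simp [PySem.Dict.keys_empty, PySem.Set.update_nil_left, h2, PySem.List.dedup_eq_ofList]
  rw [PySem.Dict.items_eq_map_keys d hnd []]
  rw [hkeys]
  unfold GroupBundles_alt
  apply List.map_congr_left
  intro k _
  have hget : d.getD k [] = (l.filter (fun q => q.1 == k)).map (·.2) := by
    rw [hd]
    simpa using PySem.Dict.getD_foldl_modify_append l PySem.Dict.empty k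
  rw [hget, hl, List.filter_map, List.map_map]
  simp [Function.comp_def]

-- ===== VERDICT (by name: the statement is the Claim_ definition above) =====
theorem GroupBundles_spec : Claim_equal_GroupBundles := by
  intro ids_old idx_new _ _
  unfold Spec_GroupBundles
  exact GroupBundles_spec' ids_old idx_new
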